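-- pv_equiv track=rewrite | github.com/Tobito320/ryx-ai | ryx_core/document_ai.py | _assess_priority
-- ===== SOURCE A (Python) =====
-- def _assess_priority(text: str) -> str:
--     """Assess document priority"""
--     text_lower = text.lower()
--
--     high_priority = [
--         "dringend", "sofort", "eilig", "mahnung",
--         "inkasso", "kündigung", "fristsetzung"
--     ]
--
--     if any(word in text_lower for word in high_priority):
--         return "HOCH"
--
--     medium_priority = [
--         "rechnung", "frist", "termin", "antwort"
--     ]
--
--     if any(word in text_lower for word in medium_priority):
--         return "MITTEL"
--
--     return "NIEDRIG"
-- ===== SOURCE B (Python) =====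
-- def _assess_priority(text: str) -> str:
--     """Assess document priority"""
--     ranks = {
--         "dringend": 2, "sofort": 2, "eilig": 2, "mahnung": 2,
--         "inkasso": 2, "kündigung": 2, "fristsetzung": 2,
--         "rechnung": 1, "frist": 1, "termin": 1, "antwort": 1,
--     }
--     t = text.lower()
--     best = 0
--     for word, rank in ranks.items():
--         if rank > best and word in t:
--             best = rank
--     return ("NIEDRIG", "MITTEL", "HOCH")[best]
-- ===== Notes on version B (the rewrite author's own statement) =====
-- stated objective: alternative
-- what changed: Replaces A's two short-circuiting any() scans over separate keyword lists with a single pass over one keyword-to-rank dict that keeps a running maximum rank, then maps the best rank back to a label by tuple indexing.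
import Mathlib
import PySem

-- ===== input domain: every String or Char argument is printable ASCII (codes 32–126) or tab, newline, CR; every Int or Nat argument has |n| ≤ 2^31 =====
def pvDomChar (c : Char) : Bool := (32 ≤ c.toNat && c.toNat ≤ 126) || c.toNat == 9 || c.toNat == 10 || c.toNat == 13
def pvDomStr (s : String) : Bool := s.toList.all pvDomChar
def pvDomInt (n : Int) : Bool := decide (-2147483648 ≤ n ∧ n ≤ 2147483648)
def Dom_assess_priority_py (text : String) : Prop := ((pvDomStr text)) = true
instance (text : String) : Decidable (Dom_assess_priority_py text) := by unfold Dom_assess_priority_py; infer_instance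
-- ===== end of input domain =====

-- B replaces A's two short-circuiting any() scans with one keyword→rank dict pass keeping a running maximum rank (alternative decomposition, same cost).


-- ===== PORT A =====
def assess_priority_py (text : String) : String :=
  let text_lower := PySem.Str.lower text
  let high_priority := ["dringend", "sofort", "eilig", "mahnung",
    "inkasso", "kündigung", "fristsetzung"]
  if high_priority.any (fun word => PySem.Str.isIn word text_lower) then "HOCH"
  else
    let medium_priority := ["rechnung", "frist", "termin", "antwort"]
    if medium_priority.any (fun word => PySem.Str.isIn word text_lower) then "MITTEL"
    else "NIEDRIG"

-- ===== PORT B =====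
def assess_priority_py_alt (text : String) : String :=
  let ranks : List (String × Int) :=
    [("dringend", 2), ("sofort", 2), ("eilig", 2), ("mahnung", 2),
     ("inkasso", 2), ("kündigung", 2), ("fristsetzung", 2),
     ("rechnung", 1), ("frist", 1), ("termin", 1), ("antwort", 1)]
  let t := PySem.Str.lower text
  let best : Int := ranks.foldl
    (fun best wr => if wr.2 > best && PySem.Str.isIn wr.1 t then wr.2 else best) 0
  -- tuple indexing ("NIEDRIG","MITTEL","HOCH")[best]; best ∈ {0,1,2}, so the .getD "" guard is unreachable
  (PySem.List.pyGet? ["NIEDRIG", "MITTEL", "HOCH"] best).getD ""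

-- ===== PRECONDITION & SPEC =====
def Spec_assess_priority_py (text : String) (out : String) : Prop := out = assess_priority_py_alt text
instance (text : String) (out : String) : Decidable (Spec_assess_priority_py text out) := by unfold Spec_assess_priority_py; infer_instance

-- ===== CLAIM (what is proved, stated in full; the proofs are below) =====
def Claim_equal_assess_priority_py : Prop := ∀ (text : String), Dom_assess_priority_py text → Spec_assess_priority_py text (assess_priority_py text)

-- ===== LEMMAS AND PROOFS =====

-- ===== VERDICT (by name: the statement is the Claim_ definition above) =====
set_option maxHeartbeats 1000000 in
theorem assess_priority_py_spec : Claim_equal_assess_priority_py := by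
  intro text _
  show assess_priority_py text = assess_priority_py_alt text
  by_cases h1 : PySem.Chars.isIn ['d', 'r', 'i', 'n', 'g', 'e', 'n', 'd'] (PySem.Chars.lower text.toList) = true
  · simp [assess_priority_py, assess_priority_py_alt, h1, PySem.List.pyGet?, PySem.List.pyIdx?]
  by_cases h2 : PySem.Chars.isIn ['s', 'o', 'f', 'o', 'r', 't'] (PySem.Chars.lower text.toList) = true
  · simp [assess_priority_py, assess_priority_py_alt, h1, h2, PySem.List.pyGet?, PySem.List.pyIdx?]
  by_cases h3 : PySem.Chars.isIn ['e', 'i', 'l', 'i', 'g'] (PySem.Chars.lower text.toList) = true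
  · simp [assess_priority_py, assess_priority_py_alt, h1, h2, h3, PySem.List.pyGet?, PySem.List.pyIdx?]
  by_cases h4 : PySem.Chars.isIn ['m', 'a', 'h', 'n', 'u', 'n', 'g'] (PySem.Chars.lower text.toList) = true
  · simp [assess_priority_py, assess_priority_py_alt, h1, h2, h3, h4, PySem.List.pyGet?, PySem.List.pyIdx?]
  by_cases h5 : PySem.Chars.isIn ['i', 'n', 'k', 'a', 's', 's', 'o'] (PySem.Chars.lower text.toList) = true
  · simp [assess_priority_py, assess_priority_py_alt, h1, h2, h3, h4, h5, PySem.List.pyGet?, PySem.List.pyIdx?]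
  by_cases h6 : PySem.Chars.isIn ['k', 'ü', 'n', 'd', 'i', 'g', 'u', 'n', 'g'] (PySem.Chars.lower text.toList) = true
  · simp [assess_priority_py, assess_priority_py_alt, h1, h2, h3, h4, h5, h6, PySem.List.pyGet?, PySem.List.pyIdx?]
  by_cases h7 : PySem.Chars.isIn ['f', 'r', 'i', 's', 't', 's', 'e', 't', 'z', 'u', 'n', 'g'] (PySem.Chars.lower text.toList) = true
  · simp [assess_priority_py, assess_priority_py_alt, h1, h2, h3, h4, h5, h6, h7, PySem.List.pyGet?, PySem.List.pyIdx?]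
  by_cases h8 : PySem.Chars.isIn ['r', 'e', 'c', 'h', 'n', 'u', 'n', 'g'] (PySem.Chars.lower text.toList) = true
  · simp [assess_priority_py, assess_priority_py_alt, h1, h2, h3, h4, h5, h6, h7, h8, PySem.List.pyGet?, PySem.List.pyIdx?]
  by_cases h9 : PySem.Chars.isIn ['f', 'r', 'i', 's', 't'] (PySem.Chars.lower text.toList) = true
  · simp [assess_priority_py, assess_priority_py_alt, h1, h2, h3, h4, h5, h6, h7, h8, h9, PySem.List.pyGet?, PySem.List.pyIdx?]
  by_cases h10 : PySem.Chars.isIn ['t', 'e', 'r', 'm', 'i', 'n'] (PySem.Chars.lower text.toList) = true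
  · simp [assess_priority_py, assess_priority_py_alt, h1, h2, h3, h4, h5, h6, h7, h8, h9, h10, PySem.List.pyGet?, PySem.List.pyIdx?]
  by_cases h11 : PySem.Chars.isIn ['a', 'n', 't', 'w', 'o', 'r', 't'] (PySem.Chars.lower text.toList) = true
  · simp [assess_priority_py, assess_priority_py_alt, h1, h2, h3, h4, h5, h6, h7, h8, h9, h10, h11, PySem.List.pyGet?, PySem.List.pyIdx?]
  · simp [assess_priority_py, assess_priority_py_alt, h1, h2, h3, h4, h5, h6, h7, h8, h9, h10, h11, PySem.List.pyGet?, PySem.List.pyIdx?]
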